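-- pv_equiv track=rewrite | github.com/pirl-unc/tsarina | tsarina/hpa.py | best_protein_support_label
-- ===== SOURCE A (Python) =====
-- PROTEIN_SUPPORT_ORDER: dict[str, int] = {
--     "Enhanced": 0,
--     "Supported": 1,
--     "Approved": 2,
--     "Uncertain": 3,
--     "Missing": 4,
-- }
--
-- def best_protein_support_label(has_protein: bool, reliability: str) -> str:
--     """Return the best HPA protein reliability tier from a semicolon-separated string."""
--     if not has_protein:
--         return "Missing"
--     values = [v.strip() for v in str(reliability).split(";") if v.strip() and v.strip() != "nan"]
--     ranked = [v for v in values if v in PROTEIN_SUPPORT_ORDER and v != "Missing"]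
--     if not ranked:
--         return "Missing"
--     return min(ranked, key=lambda v: PROTEIN_SUPPORT_ORDER[v])
-- ===== SOURCE B (Python) =====
-- _TIERS = ("Enhanced", "Supported", "Approved", "Uncertain")
--
-- def best_protein_support_label(has_protein: bool, reliability: str) -> str:
--     """Return the best HPA protein reliability tier from a semicolon-separated string."""
--     if not has_protein:
--         return "Missing"
--     present = {v.strip() for v in str(reliability).split(";")}
--     for tier in _TIERS:
--         if tier in present:
--             return tier
--     return "Missing"
-- ===== Notes on version B (the rewrite author's own statement) =====
-- stated objective: idiomatic
-- what changed: Replaces the filter-into-ranked-list plus min-with-rank-key by building a set of stripped tokens once and scanning the fixed tier labels in priority order, returning the first one present.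
import Mathlib
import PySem

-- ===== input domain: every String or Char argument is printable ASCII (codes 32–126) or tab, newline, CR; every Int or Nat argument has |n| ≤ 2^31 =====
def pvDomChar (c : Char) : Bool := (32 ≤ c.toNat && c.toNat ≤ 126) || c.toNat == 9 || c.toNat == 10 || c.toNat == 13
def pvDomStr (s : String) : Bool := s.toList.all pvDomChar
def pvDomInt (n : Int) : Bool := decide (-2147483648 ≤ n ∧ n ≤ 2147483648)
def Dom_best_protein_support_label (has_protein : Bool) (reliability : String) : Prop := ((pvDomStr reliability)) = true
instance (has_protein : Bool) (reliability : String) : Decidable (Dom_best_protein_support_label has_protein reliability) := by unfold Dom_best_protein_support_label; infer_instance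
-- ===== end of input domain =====

-- B replaces A's filter-into-ranked-list plus min-with-rank-key by a set of stripped tokens
-- and a scan of the four tier labels in priority order (idiomatic; return value only).

-- ===== PORT A =====
def PROTEIN_SUPPORT_ORDER : PySem.Dict String Int :=
  PySem.Dict.ofList [("Enhanced", 0), ("Supported", 1), ("Approved", 2), ("Uncertain", 3), ("Missing", 4)]

def best_protein_support_label (has_protein : Bool) (reliability : String) : String :=
  if !has_protein then "Missing"
  else
    let values : List String :=
      (((PySem.Str.split? reliability ";").getD []).map PySem.Str.strip).filter
        (fun v => !(v == "") && !(v == "nan"))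
    let ranked : List String :=
      values.filter (fun v => PROTEIN_SUPPORT_ORDER.contains v && !(v == "Missing"))
    if ranked.isEmpty then "Missing"
    else
      match PySem.List.min? ranked (fun v => (PROTEIN_SUPPORT_ORDER.get? v).getD 0) with
      | some m => m
      | none => "Missing"

-- ===== PORT B =====
def best_protein_support_label_alt (has_protein : Bool) (reliability : String) : String :=
  if !has_protein then "Missing"
  else
    let present : PySem.Set String :=
      PySem.Set.ofList (((PySem.Str.split? reliability ";").getD []).map PySem.Str.strip)
    match ["Enhanced", "Supported", "Approved", "Uncertain"].find?
        (fun t => PySem.Set.contains present t) with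
    | some t => t
    | none => "Missing"

-- ===== PRECONDITION & SPEC =====
def Spec_best_protein_support_label (has_protein : Bool) (reliability : String) (out : String) : Prop := out = best_protein_support_label_alt has_protein reliability
instance (has_protein : Bool) (reliability : String) (out : String) : Decidable (Spec_best_protein_support_label has_protein reliability out) := by unfold Spec_best_protein_support_label; infer_instance

-- ===== CLAIM (what is proved, stated in full; the proofs are below) =====
def Claim_equal_best_protein_support_label : Prop := ∀ (has_protein : Bool) (reliability : String), Dom_best_protein_support_label has_protein reliability → Spec_best_protein_support_label has_protein reliability (best_protein_support_label has_protein reliability)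

-- ===== LEMMAS AND PROOFS =====

-- the composite of A's two filters, pointwise: exactly the four non-"Missing" tier labels
lemma pv_pred_eq (v : String) :
    ((PROTEIN_SUPPORT_ORDER.contains v && !(v == "Missing")) && (!(v == "") && !(v == "nan"))) =
    (v == "Enhanced" || v == "Supported" || v == "Approved" || v == "Uncertain") := by
  by_cases h1 : v = "Enhanced" <;> by_cases h2 : v = "Supported" <;>
    by_cases h3 : v = "Approved" <;> by_cases h4 : v = "Uncertain" <;>
    by_cases h5 : v = "Missing" <;>
    first
      | (subst_vars; decide)
      | (have hit : PROTEIN_SUPPORT_ORDER.items =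
            [("Enhanced", (0:Int)), ("Supported", 1), ("Approved", 2), ("Uncertain", 3), ("Missing", 4)] := by rfl
         have e1 : ("Enhanced" == v) = false := beq_eq_false_iff_ne.mpr (fun h => h1 h.symm)
         have e2 : ("Supported" == v) = false := beq_eq_false_iff_ne.mpr (fun h => h2 h.symm)
         have e3 : ("Approved" == v) = false := beq_eq_false_iff_ne.mpr (fun h => h3 h.symm)
         have e4 : ("Uncertain" == v) = false := beq_eq_false_iff_ne.mpr (fun h => h4 h.symm)
         have e5 : ("Missing" == v) = false := beq_eq_false_iff_ne.mpr (fun h => h5 h.symm)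
         have f1 : (v == "Enhanced") = false := beq_eq_false_iff_ne.mpr h1
         have f2 : (v == "Supported") = false := beq_eq_false_iff_ne.mpr h2
         have f3 : (v == "Approved") = false := beq_eq_false_iff_ne.mpr h3
         have f4 : (v == "Uncertain") = false := beq_eq_false_iff_ne.mpr h4
         simp [PySem.Dict.contains, hit, e1, e2, e3, e4, e5, f1, f2, f3, f4])

def pvQ (v : String) : Bool :=
  v == "Enhanced" || v == "Supported" || v == "Approved" || v == "Uncertain"

def pvRk (v : String) : Int := (PROTEIN_SUPPORT_ORDER.get? v).getD 0

lemma pv_filter_eq (ws : List String) :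
    ((ws.filter (fun v => !(v == "") && !(v == "nan"))).filter
      (fun v => PROTEIN_SUPPORT_ORDER.contains v && !(v == "Missing"))) = ws.filter pvQ := by
  rw [List.filter_filter]
  exact List.filter_congr (fun v _ => pv_pred_eq v)

lemma pv_q_cases {v : String} (h : pvQ v = true) :
    v = "Enhanced" ∨ v = "Supported" ∨ v = "Approved" ∨ v = "Uncertain" := by
  have h' := h
  simp [pvQ] at h'
  tauto

lemma pv_min_case (ws : List String) (t : String) (ht : t ∈ ws.filter pvQ)
    (hbest : ∀ m ∈ ws.filter pvQ, pvRk m ≤ pvRk t → m = t) :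
    (if (ws.filter pvQ).isEmpty then "Missing"
     else
       match PySem.List.min? (ws.filter pvQ) pvRk with
       | some m => m
       | none => "Missing") = t := by
  have hne : ws.filter pvQ ≠ [] := List.ne_nil_of_mem ht
  rw [if_neg (by simpa [List.isEmpty_iff] using hne)]
  cases hm : PySem.List.min? (ws.filter pvQ) pvRk with
  | none => exact absurd ((PySem.List.min?_eq_none_iff _ _).mp hm) hne
  | some m =>
    exact hbest m (PySem.List.min?_mem hm) (PySem.List.min?_isMin hm t ht)

lemma pv_core (ws : List String) :
    (let ranked := (ws.filter (fun v => !(v == "") && !(v == "nan"))).filter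
        (fun v => PROTEIN_SUPPORT_ORDER.contains v && !(v == "Missing"));
     if ranked.isEmpty then "Missing"
     else
       match PySem.List.min? ranked (fun v => (PROTEIN_SUPPORT_ORDER.get? v).getD 0) with
       | some m => m
       | none => "Missing") =
    (match ["Enhanced", "Supported", "Approved", "Uncertain"].find?
        (fun t => PySem.Set.contains (PySem.Set.ofList ws) t) with
     | some t => t
     | none => "Missing") := by
  show (if (ws.filter (fun v => !(v == "") && !(v == "nan"))).filter
        (fun v => PROTEIN_SUPPORT_ORDER.contains v && !(v == "Missing")) |>.isEmpty then "Missing"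
     else _) = _
  rw [pv_filter_eq]
  by_cases hE : "Enhanced" ∈ ws
  · have hb : ∀ m ∈ ws.filter pvQ, pvRk m ≤ pvRk "Enhanced" → m = "Enhanced" := by
      intro m hmf hle
      obtain ⟨hmw, hmq⟩ := List.mem_filter.mp hmf
      rcases pv_q_cases hmq with rfl | rfl | rfl | rfl
      · rfl
      all_goals (exfalso; revert hle; decide)
    refine Eq.trans (pv_min_case ws "Enhanced" (List.mem_filter.mpr ⟨hE, by decide⟩) hb) ?_
    simp [List.find?, hE]
  · by_cases hS : "Supported" ∈ ws
    · have hb : ∀ m ∈ ws.filter pvQ, pvRk m ≤ pvRk "Supported" → m = "Supported" := by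
        intro m hmf hle
        obtain ⟨hmw, hmq⟩ := List.mem_filter.mp hmf
        rcases pv_q_cases hmq with rfl | rfl | rfl | rfl
        · exact absurd hmw hE
        · rfl
        all_goals (exfalso; revert hle; decide)
      refine Eq.trans (pv_min_case ws "Supported" (List.mem_filter.mpr ⟨hS, by decide⟩) hb) ?_
      simp [List.find?, hE, hS]
    · by_cases hA : "Approved" ∈ ws
      · have hb : ∀ m ∈ ws.filter pvQ, pvRk m ≤ pvRk "Approved" → m = "Approved" := by
          intro m hmf hle
          obtain ⟨hmw, hmq⟩ := List.mem_filter.mp hmf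
          rcases pv_q_cases hmq with rfl | rfl | rfl | rfl
          · exact absurd hmw hE
          · exact absurd hmw hS
          · rfl
          · exfalso; revert hle; decide
        refine Eq.trans (pv_min_case ws "Approved" (List.mem_filter.mpr ⟨hA, by decide⟩) hb) ?_
        simp [List.find?, hE, hS, hA]
      · by_cases hU : "Uncertain" ∈ ws
        · have hb : ∀ m ∈ ws.filter pvQ, pvRk m ≤ pvRk "Uncertain" → m = "Uncertain" := by
            intro m hmf hle
            obtain ⟨hmw, hmq⟩ := List.mem_filter.mp hmf
            rcases pv_q_cases hmq with rfl | rfl | rfl | rfl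
            · exact absurd hmw hE
            · exact absurd hmw hS
            · exact absurd hmw hA
            · rfl
          refine Eq.trans (pv_min_case ws "Uncertain" (List.mem_filter.mpr ⟨hU, by decide⟩) hb) ?_
          simp [List.find?, hE, hS, hA, hU]
        · have h0 : ws.filter pvQ = [] := by
            rw [List.filter_eq_nil_iff]
            intro v hv hq
            rcases pv_q_cases hq with rfl | rfl | rfl | rfl
            · exact hE hv
            · exact hS hv
            · exact hA hv
            · exact hU hv
          simp [h0, List.find?, hE, hS, hA, hU]

-- ===== VERDICT (by name: the statement is the Claim_ definition above) =====
theorem best_protein_support_label_spec : Claim_equal_best_protein_support_label := by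
  intro has_protein reliability _
  unfold Spec_best_protein_support_label best_protein_support_label best_protein_support_label_alt
  cases has_protein with
  | false => rfl
  | true =>
    simp only [Bool.not_true, if_neg (by decide : ¬ (false = true))]
    exact pv_core (((PySem.Str.split? reliability ";").getD []).map PySem.Str.strip)
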